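-- pv_equiv track=rewrite | github.com/ayeletavr/intro_to_CS | ex5/wordsearch.py | search_r
-- ===== SOURCE A (Python) =====
-- def search_r(word_list,matrix): #for r direction.
--     join_mat = []
--     r_lst = []
--     sep = ""
--     for row in matrix[:]:
--         join_mat.append(sep.join(row))
--     for word in word_list:
--         for row in join_mat:
--             index = row.find(word)
--             if index != -1:
--                 r_lst.append(word)
--                 while index <= len(row):
--                     index = row.find(word, index + 1)  # to check until there are no letters left.
--                     if index != -1:
--                         r_lst.append(word)
--                     else:
--                         break
--     return r_lst
-- ===== SOURCE B (Python) =====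
-- def search_r(word_list, matrix):
--     # Single left-to-right streaming pass per row: simulate all partial matches
--     # at once (NFA-style set of matched-prefix lengths), no slicing or find().
--     rows = ["".join(row) for row in matrix]
--     out = []
--     for word in word_list:
--         if not word:
--             total = sum(len(row) + 1 for row in rows)
--         else:
--             total = 0
--             for row in rows:
--                 live = []  # matched-prefix lengths of currently active partial matches
--                 for ch in row:
--                     nxt = []
--                     for j in [0] + live:
--                         if word[j] == ch:
--                             if j + 1 == len(word):
--                                 total += 1
--                             else:
--                                 nxt.append(j + 1)
--                     live = nxt
--         out.extend([word] * total)
--     return out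
-- ===== Notes on version B (the rewrite author's own statement) =====
-- stated objective: alternative
-- what changed: replaces A's per-word repeated str.find rescans with a single left-to-right streaming pass over each row that simulates all partial matches at once (an NFA-style set of active matched-prefix lengths), never slicing or re-searching; the empty pattern is handled by its closed form len(row)+1
import Mathlib
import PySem

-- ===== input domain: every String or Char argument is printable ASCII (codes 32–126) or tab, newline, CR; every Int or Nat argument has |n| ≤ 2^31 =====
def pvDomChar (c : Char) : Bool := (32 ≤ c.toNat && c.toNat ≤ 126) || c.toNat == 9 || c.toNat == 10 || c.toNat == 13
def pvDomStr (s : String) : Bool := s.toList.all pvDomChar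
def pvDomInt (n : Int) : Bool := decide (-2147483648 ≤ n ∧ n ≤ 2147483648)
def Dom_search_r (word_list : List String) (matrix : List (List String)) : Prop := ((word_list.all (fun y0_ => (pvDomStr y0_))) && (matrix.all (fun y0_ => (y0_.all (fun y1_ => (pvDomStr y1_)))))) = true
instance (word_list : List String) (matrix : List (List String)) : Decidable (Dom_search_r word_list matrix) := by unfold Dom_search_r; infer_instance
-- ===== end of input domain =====

-- B replaces A's repeated str.find/while rescans by ONE streaming left-to-right pass per row
-- that advances every active partial match simultaneously (a set of matched-prefix lengths);
-- same worst-case cost class, different algorithm.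

-- ===== PORT A =====

-- the 'while index <= len(row): index = row.find(word, index+1); if index != -1: append else break' loop of A
-- (fuel is only a totality guard: the loop index strictly increases and stays ≤ len(row), so
--  any fuel ≥ len(row)+1-index runs the loop to its Python exit; callers pass len(row)+2)
def searchWhile (row word : String) (fuel : Nat) (index : Nat) (acc : List String) : List String :=
  match fuel with
  | 0 => acc
  | fuel + 1 =>
    if (index : Int) ≤ PySem.Str.len row then
      if PySem.Str.findFrom row word ((index : Int) + 1) none ≠ -1 then
        searchWhile row word fuel (PySem.Str.findFrom row word ((index : Int) + 1) none).toNat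
          (acc ++ [word])
      else acc
    else acc

def search_r (word_list : List String) (matrix : List (List String)) : List String :=
  let join_mat := (PySem.List.slice matrix none none).foldl
    (fun jm row => jm ++ [PySem.Str.join "" row]) []
  word_list.foldl (fun r_lst word =>
    join_mat.foldl (fun r_lst row =>
      let index := PySem.Str.find row word
      if index ≠ -1 then
        searchWhile row word ((PySem.Str.len row).toNat + 2) index.toNat (r_lst ++ [word])
      else r_lst) r_lst) []

-- ===== PORT B =====

-- one row of B's streaming scan: for each character, advance every active partial match
-- ('live' = matched-prefix lengths), starting a fresh candidate (j = 0) at every position;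
-- a completed match (j + 1 = len word) bumps the counter instead of staying live.
-- (word[j] is ported as getD with a dummy default: j < len word by construction.)
def pvScanRow (w : List Char) (total : Nat) (row : List Char) : Nat :=
  (row.foldl (fun st ch =>
      (0 :: st.2).foldl (fun acc j =>
        if w.getD j ' ' == ch then
          if j + 1 == w.length then (acc.1 + 1, acc.2) else (acc.1, acc.2 ++ [j + 1])
        else acc) (st.1, ([] : List Nat))) (total, ([] : List Nat))).1

def search_r_alt (word_list : List String) (matrix : List (List String)) : List String :=
  let rows := matrix.map (fun row => PySem.Str.join "" row)
  word_list.foldl (fun out word =>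
    let total :=
      if word.toList.isEmpty then
        rows.foldl (fun t row => t + (row.toList.length + 1)) 0
      else
        rows.foldl (fun t row => pvScanRow word.toList t row.toList) 0
    out ++ List.replicate total word) []

-- ===== PRECONDITION & SPEC =====
def Spec_search_r (word_list : List String) (matrix : List (List String)) (out : List String) : Prop := out = search_r_alt word_list matrix
instance (word_list : List String) (matrix : List (List String)) (out : List String) : Decidable (Spec_search_r word_list matrix out) := by unfold Spec_search_r; infer_instance

-- ===== CLAIM (what is proved, stated in full; the proofs are below) =====
def Claim_equal_search_r : Prop := ∀ (word_list : List String) (matrix : List (List String)), Dom_search_r word_list matrix → Spec_search_r word_list matrix (search_r word_list matrix)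

-- ===== LEMMAS AND PROOFS =====

-- CPython keeps giving -1 for a find start past len(s)
theorem pvFindFrom_gt_len (row word : List Char) (k : Int) (h0 : 0 ≤ k)
    (h : (row.length : Int) < k) : PySem.Chars.findFrom row word k none = -1 := by
  have hk : ¬ k < 0 := not_lt.mpr h0
  simp [PySem.Chars.findFrom, hk, h]

-- a successful find from index+1 lands strictly beyond index and inside the row
theorem pvFindFrom_succ_bounds (row word : List Char) (index : Nat)
    (h : PySem.Chars.findFrom row word ((index : Int) + 1) none ≠ -1) :
    index < (PySem.Chars.findFrom row word ((index : Int) + 1) none).toNat ∧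
      (PySem.Chars.findFrom row word ((index : Int) + 1) none).toNat ≤ row.length := by
  have hcast : ((index : Int) + 1) = ((index + 1 : Nat) : Int) := by push_cast; ring
  rw [hcast] at h ⊢
  by_cases hk : index + 1 ≤ row.length
  · have heq := PySem.Chars.findFrom_natCast row word (index + 1) hk
    rw [heq] at h ⊢
    have h1 := PySem.Chars.neg_one_le_find (row.drop (index + 1)) word
    have h2 := PySem.Chars.find_le_length (row.drop (index + 1)) word
    rw [List.length_drop] at h2
    by_cases hf : PySem.Chars.find (row.drop (index + 1)) word = -1
    · rw [if_pos hf] at h; exact absurd rfl h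
    · rw [if_neg hf] at h ⊢
      constructor <;> omega
  · exact absurd (pvFindFrom_gt_len row word _ (by omega) (by omega)) h

-- number of match positions of `word` in `row` at indices ≥ k (positions range over 0..len row)
def pvCnt (row word : List Char) (k : Nat) : Nat :=
  ((Finset.range (row.length + 1)).filter (fun i => k ≤ i ∧ word <+: row.drop i)).card

theorem pvCnt_eq_zero (row word : List Char) (k : Nat)
    (h : ∀ i, k ≤ i → i ≤ row.length → ¬ word <+: row.drop i) : pvCnt row word k = 0 := by
  unfold pvCnt
  rw [Finset.card_eq_zero, Finset.filter_eq_empty_iff]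
  intro i hi
  rw [Finset.mem_range] at hi
  rintro ⟨hki, hpi⟩
  exact h i hki (by omega) hpi

theorem pvCnt_step (row word : List Char) (k m : Nat) (hk : k ≤ m) (hm : m ≤ row.length)
    (hp : word <+: row.drop m) (hmin : ∀ i, k ≤ i → i < m → ¬ word <+: row.drop i) :
    pvCnt row word k = pvCnt row word (m + 1) + 1 := by
  unfold pvCnt
  have hset : (Finset.range (row.length + 1)).filter (fun i => k ≤ i ∧ word <+: row.drop i)
      = insert m ((Finset.range (row.length + 1)).filter (fun i => m + 1 ≤ i ∧ word <+: row.drop i)) := by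
    ext i
    simp only [Finset.mem_insert, Finset.mem_filter, Finset.mem_range]
    constructor
    · rintro ⟨hir, hki, hpi⟩
      rcases lt_trichotomy i m with hlt | rfl | hgt
      · exact absurd hpi (hmin i hki hlt)
      · exact Or.inl rfl
      · exact Or.inr ⟨hir, by omega, hpi⟩
    · rintro (rfl | ⟨hir, hmi, hpi⟩)
      · exact ⟨by omega, hk, hp⟩
      · exact ⟨hir, by omega, hpi⟩
  rw [hset, Finset.card_insert_of_notMem (by simp)]

theorem pvSearchWhile_eq (row word : String) (fuel : Nat) :
    ∀ (index : Nat) (acc : List String), row.toList.length + 1 ≤ fuel + index →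
      searchWhile row word fuel index acc =
        acc ++ List.replicate (pvCnt row.toList word.toList (index + 1)) word := by
  induction fuel with
  | zero =>
    intro index acc hfuel
    rw [searchWhile, pvCnt_eq_zero, List.replicate_zero, List.append_nil]
    intro i hi1 hi2 _
    omega
  | succ fuel ih =>
    intro index acc hfuel
    rw [searchWhile]
    by_cases h1 : (index : Int) ≤ PySem.Str.len row
    · rw [if_pos h1]
      by_cases h2 : PySem.Str.findFrom row word ((index : Int) + 1) none ≠ -1
      · rw [if_pos h2]
        have h2' : PySem.Chars.findFrom row.toList word.toList ((index : Int) + 1) none ≠ -1 := by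
          simpa only [PySem.Str.findFrom_eq] using h2
        have hbounds := pvFindFrom_succ_bounds row.toList word.toList index h2'
        rw [ih _ _ (by rw [PySem.Str.findFrom_eq]; omega)]
        have hk : index + 1 ≤ row.toList.length := by
          by_contra hgt
          exact h2' (pvFindFrom_gt_len _ _ _ (by omega) (by omega))
        have hcast : ((index : Int) + 1) = ((index + 1 : Nat) : Int) := by push_cast; ring
        have hspec := PySem.Chars.findFrom_natCast_spec row.toList word.toList (index + 1) hk
          (by rw [← hcast]; exact h2')
        rw [← hcast] at hspec
        obtain ⟨hge, hpre, hmin⟩ := hspec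
        have hstep := pvCnt_step row.toList word.toList (index + 1)
          (PySem.Chars.findFrom row.toList word.toList ((index : Int) + 1) none).toNat
          (by omega) hbounds.2 hpre hmin
        rw [PySem.Str.findFrom_eq, hstep]
        simp [List.replicate_succ]
      · rw [if_neg h2]
        have hF : PySem.Chars.findFrom row.toList word.toList ((index : Int) + 1) none = -1 := by
          have := not_not.mp h2
          simpa only [PySem.Str.findFrom_eq] using this
        rw [pvCnt_eq_zero, List.replicate_zero, List.append_nil]
        intro i hi1 hi2 hpre
        by_cases hk : index + 1 ≤ row.toList.length
        · have hcast : ((index : Int) + 1) = ((index + 1 : Nat) : Int) := by push_cast; ring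
          rw [hcast] at hF
          have hni := (PySem.Chars.findFrom_natCast_eq_neg_one_iff row.toList word.toList (index + 1) hk).mp hF
          have hdd : row.toList.drop i = (row.toList.drop (index + 1)).drop (i - (index + 1)) := by
            rw [List.drop_drop]; congr 1; omega
          rw [hdd] at hpre
          exact hni (hpre.isInfix.trans (List.drop_suffix _ _).isInfix)
        · omega
    · rw [if_neg h1]
      rw [PySem.Str.len_eq] at h1
      rw [pvCnt_eq_zero, List.replicate_zero, List.append_nil]
      intro i hi1 hi2 _
      omega

-- A's per-row body appends word once per match position
theorem pvRowStepA (row word : String) (acc : List String) :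
    (let index := PySem.Str.find row word
     if index ≠ -1 then
       searchWhile row word ((PySem.Str.len row).toNat + 2) index.toNat (acc ++ [word])
     else acc) =
      acc ++ List.replicate (pvCnt row.toList word.toList 0) word := by
  show (if PySem.Str.find row word ≠ -1
      then searchWhile row word ((PySem.Str.len row).toNat + 2) (PySem.Str.find row word).toNat (acc ++ [word])
      else acc) = _
  by_cases hf : PySem.Str.find row word = -1
  · rw [if_neg (by simpa using hf)]
    rw [pvCnt_eq_zero, List.replicate_zero, List.append_nil]
    intro i _ hi hpre
    rw [PySem.Str.find_eq] at hf
    exact (PySem.Chars.find_eq_neg_one_iff _ _).mp hf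
      (hpre.isInfix.trans (List.drop_suffix _ _).isInfix)
  · rw [if_pos (by simpa using hf),
      pvSearchWhile_eq row word _ _ _ (by rw [PySem.Str.len_eq]; omega)]
    rw [PySem.Str.find_eq] at hf ⊢
    have h0 : (0 : Int) ≤ PySem.Chars.find row.toList word.toList := by
      have := PySem.Chars.neg_one_le_find row.toList word.toList
      omega
    obtain ⟨hpre, hmin⟩ := PySem.Chars.find_spec h0
    have hle := PySem.Chars.find_le_length row.toList word.toList
    have hstep := pvCnt_step row.toList word.toList 0
      (PySem.Chars.find row.toList word.toList).toNat
      (Nat.zero_le _) (by omega) hpre (fun i _ hi => hmin i hi)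
    rw [hstep]
    simp [List.replicate_succ]

theorem pvShift (f : String → Nat) (rs : List String) (t : Nat) :
    rs.foldl (fun a x => a + f x) t = t + rs.foldl (fun a x => a + f x) 0 := by
  induction rs generalizing t with
  | nil => simp
  | cons r rs ih =>
    simp only [List.foldl_cons]
    rw [ih, ih (0 + f r)]
    omega

-- A's per-word row sweep emits word once per match position, summed over the rows
theorem pvWordFoldA (word : String) (rows : List String) (acc : List String) :
    rows.foldl (fun r_lst row =>
      let index := PySem.Str.find row word
      if index ≠ -1 then
        searchWhile row word ((PySem.Str.len row).toNat + 2) index.toNat (r_lst ++ [word])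
      else r_lst) acc =
    acc ++ List.replicate
      (rows.foldl (fun t row => t + pvCnt row.toList word.toList 0) 0) word := by
  induction rows generalizing acc with
  | nil => simp
  | cons r rs ih =>
    simp only [List.foldl_cons]
    rw [pvRowStepA, ih,
      pvShift (fun row => pvCnt row.toList word.toList 0) rs (0 + pvCnt r.toList word.toList 0),
      Nat.zero_add, List.replicate_add, List.append_assoc]

-- ---- B-side: the streaming scan counts the same match positions ----

-- matches of w ending at a position ≤ |p| inside p, counted by their END position
def pvCntE (w p : List Char) : Nat :=
  ((Finset.range (p.length + 1)).filter (fun e => w <:+ p.take e)).card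

-- the live list B maintains after consuming p: matched-prefix lengths 1..|w|-1
def pvAlive (w p : List Char) : List Nat :=
  ((List.range (w.length - 1)).filter (fun j => decide (w.take (j + 1) <:+ p))).map (· + 1)

theorem pvConcat_suffix_concat (u v : List Char) (a b : Char) :
    u ++ [a] <:+ v ++ [b] ↔ u <:+ v ∧ a = b := by
  rw [← List.reverse_prefix]
  simp [List.reverse_append, List.cons_prefix_cons, and_comm]
theorem pvTake_succ_concat (w : List Char) (j : Nat) (hj : j < w.length) :
    w.take (j + 1) = w.take j ++ [w[j]] := by
  rw [List.take_succ]
  simp [List.getElem?_eq_getElem hj]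
theorem pvStep_suffix (w p : List Char) (c : Char) (j : Nat) (hj : j < w.length) :
    (w.take (j + 1) <:+ p ++ [c]) ↔ (w.take j <:+ p ∧ w[j] = c) := by
  rw [pvTake_succ_concat w j hj, pvConcat_suffix_concat]
theorem pvInner (w : List Char) (c : Char) (L : List Nat) (n : Nat) (acc2 : List Nat) :
    L.foldl (fun acc j =>
        if w.getD j ' ' == c then
          if j + 1 == w.length then (acc.1 + 1, acc.2) else (acc.1, acc.2 ++ [j + 1])
        else acc) (n, acc2) =
      (n + L.countP (fun j => w.getD j ' ' == c && j + 1 == w.length),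
       acc2 ++ (L.filter (fun j => w.getD j ' ' == c && !(j + 1 == w.length))).map (· + 1)) := by
  induction L generalizing n acc2 with
  | nil => simp
  | cons j L ih =>
    simp only [List.foldl_cons]
    split
    · split
      · rename_i h1 h2
        have hb1 : (w.getD j ' ' == c && j + 1 == w.length) = true := by rw [h1, h2]; rfl
        have hb2 : (w.getD j ' ' == c && !(j + 1 == w.length)) = false := by rw [h1, h2]; rfl
        rw [ih, List.countP_cons, List.filter_cons, hb1, hb2]
        simp only [if_true, Bool.false_eq_true, if_false, Prod.mk.injEq]
        exact ⟨by omega, trivial⟩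
      · rename_i h1 h2
        have h2' : (j + 1 == w.length) = false := by
          simpa using h2
        have hb1 : (w.getD j ' ' == c && j + 1 == w.length) = false := by rw [h1, h2']; rfl
        have hb2 : (w.getD j ' ' == c && !(j + 1 == w.length)) = true := by rw [h1, h2']; rfl
        rw [ih, List.countP_cons, List.filter_cons, hb1, hb2]
        simp only [if_true, Bool.false_eq_true, if_false, Prod.mk.injEq, List.map_cons]
        exact ⟨by omega, by simp⟩
    · rename_i h1
      have h1' : (w.getD j ' ' == c) = false := by simpa using h1
      have hb1 : (w.getD j ' ' == c && j + 1 == w.length) = false := by rw [h1']; rfl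
      have hb2 : (w.getD j ' ' == c && !(j + 1 == w.length)) = false := by rw [h1']; rfl
      rw [ih, List.countP_cons, List.filter_cons, hb1, hb2]
      simp only [Bool.false_eq_true, if_false, Prod.mk.injEq]
      exact ⟨by omega, trivial⟩
theorem pvAlive_step (w p : List Char) (c : Char) (hw : w ≠ []) :
    ((0 :: pvAlive w p).filter (fun j => w.getD j ' ' == c && !(j + 1 == w.length))).map (· + 1)
      = pvAlive w (p ++ [c]) := by
  obtain ⟨m, hm⟩ : ∃ m, w.length = m + 1 :=
    ⟨w.length - 1, by have := List.length_pos_of_ne_nil hw; omega⟩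
  unfold pvAlive
  rw [hm]
  simp only [Nat.add_sub_cancel]
  rw [List.filter_cons, List.filter_map, List.filter_filter]
  simp only [Function.comp_def]
  match m with
  | 0 => simp
  | k + 1 =>
    have hD'0 : (decide (w.take (0 + 1) <:+ p ++ [c])) = (w.getD 0 ' ' == c) := by
      rw [List.getD_eq_getElem w ' ' (by omega)]
      have := pvStep_suffix w p c 0 (by omega)
      simp only [List.take_zero] at this
      by_cases hc : w[0] = c
      · simp [this, hc, List.nil_suffix]
      · simp [this, hc]
    have hcont0 : (w.getD 0 ' ' == c && !(0 + 1 == k + 1 + 1)) = (w.getD 0 ' ' == c) := by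
      simp
    -- tail predicates agree on range k
    have htail : (List.range k).filter
        (fun j => (w.getD (j + 1) ' ' == c && !(j + 1 + 1 == k + 1 + 1)) && decide (w.take (j + 1) <:+ p))
        = (List.range k).filter (fun j => decide (w.take (j + 1 + 1) <:+ p ++ [c])) := by
      apply List.filter_congr
      intro j hj
      rw [List.mem_range] at hj
      have hjlen : j + 1 < w.length := by omega
      have hg : w.getD (j + 1) ' ' = w[j + 1]'hjlen := List.getD_eq_getElem w ' ' hjlen
      have hstep := pvStep_suffix w p c (j + 1) hjlen
      have hne : (!(j + 1 + 1 == k + 1 + 1)) = true := by simp; omega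
      rw [hg, hne]
      by_cases hD : w.take (j + 1) <:+ p
      · by_cases hc : w[j + 1]'hjlen = c
        · simp [hstep, hD, hc]
        · simp [hstep, hD, hc]
      · simp [hstep, hD]
    -- the last candidate k (length k+1 prefix continuing to full length) is filtered out on the left
    have hlast : (List.range (k + 1)).filter
        (fun j => (w.getD (j + 1) ' ' == c && !(j + 1 + 1 == k + 1 + 1)) && decide (w.take (j + 1) <:+ p))
        = (List.range k).filter
        (fun j => (w.getD (j + 1) ' ' == c && !(j + 1 + 1 == k + 1 + 1)) && decide (w.take (j + 1) <:+ p)) := by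
      rw [List.range_succ, List.filter_append]
      simp
    -- right-hand side decomposed the same way
    conv_rhs => rw [List.range_succ_eq_map, List.filter_cons, List.filter_map]
    simp only [Function.comp_def, Nat.succ_eq_add_one]
    rw [hcont0, hD'0.symm, hlast, htail]
theorem pvCount_step (w p : List Char) (c : Char) (hw : w ≠ []) :
    (0 :: pvAlive w p).countP (fun j => w.getD j ' ' == c && j + 1 == w.length)
      = if w <:+ p ++ [c] then 1 else 0 := by
  obtain ⟨m, hm⟩ : ∃ m, w.length = m + 1 :=
    ⟨w.length - 1, by have := List.length_pos_of_ne_nil hw; omega⟩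
  have hsfx : (w <:+ p ++ [c]) ↔ (w.take m <:+ p ∧ w[m] = c) := by
    have := pvStep_suffix w p c m (by omega)
    rwa [show m + 1 = w.length from hm.symm, List.take_length] at this
  unfold pvAlive
  rw [List.countP_cons, List.countP_map, List.countP_filter, hm]
  simp only [Nat.add_sub_cancel, Function.comp_def]
  match m with
  | 0 =>
    have h0 : w.getD 0 ' ' = w[0] := List.getD_eq_getElem w ' ' (by omega)
    rw [List.range_zero]
    by_cases hc : w[0] = c
    · simp [hsfx, hc, h0, hm]
    · simp [hsfx, hc, h0, hm]
  | k + 1 =>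
    have hgk : w.getD (k + 1) ' ' = w[k + 1]'(by omega) := List.getD_eq_getElem w ' ' (by omega)
    have hcomp0 : ((w.getD 0 ' ' == c && 0 + 1 == k + 1 + 1) = false) := by
      simp
    rw [hcomp0, List.range_succ, List.countP_append]
    have hz : (List.range k).countP
        (fun j => (w.getD (j+1) ' ' == c && j + 1 + 1 == k + 1 + 1) && decide (w.take (j + 1) <:+ p)) = 0 := by
      rw [List.countP_eq_zero]
      intro j hj
      rw [List.mem_range] at hj
      simp
      intro _ h
      omega
    rw [hz]
    by_cases hD : w.take (k + 1) <:+ p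
    · by_cases hc : w[k + 1]'(by omega) = c
      · have : w <:+ p ++ [c] := hsfx.mpr ⟨by simpa using hD, by simpa using hc⟩
        simp [this, hgk, hc, hD, hm]
      · have : ¬ w <:+ p ++ [c] := fun h => hc (by simpa using (hsfx.mp h).2)
        simp [this, hgk, hc, hD, hm]
    · have : ¬ w <:+ p ++ [c] := fun h => hD (by simpa using (hsfx.mp h).1)
      simp [this, hD, hm]
theorem pvCntE_step (w p : List Char) (c : Char) :
    pvCntE w (p ++ [c]) = pvCntE w p + (if w <:+ p ++ [c] then 1 else 0) := by
  unfold pvCntE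
  have hlen : (p ++ [c]).length + 1 = (p.length + 1) + 1 := by simp
  rw [hlen, Finset.range_add_one, Finset.filter_insert]
  have hsame : (Finset.range (p.length + 1)).filter (fun e => w <:+ (p ++ [c]).take e)
      = (Finset.range (p.length + 1)).filter (fun e => w <:+ p.take e) := by
    apply Finset.filter_congr
    intro e he
    rw [Finset.mem_range] at he
    rw [List.take_append_of_le_length (by omega)]
  have htake : (p ++ [c]).take (p.length + 1) = p ++ [c] := by
    rw [List.take_of_length_le (by simp)]
  rw [htake]
  by_cases hs : w <:+ p ++ [c]
  · rw [if_pos hs, if_pos hs, Finset.card_insert_of_notMem (by simp), hsame]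
  · rw [if_neg hs, if_neg hs, hsame]
    omega
theorem pvScan_invariant (w : List Char) (hw : w ≠ []) (r : List Char) :
    ∀ (p : List Char) (n : Nat),
      r.foldl (fun st ch =>
          (0 :: st.2).foldl (fun acc j =>
            if w.getD j ' ' == ch then
              if j + 1 == w.length then (acc.1 + 1, acc.2) else (acc.1, acc.2 ++ [j + 1])
            else acc) (st.1, ([] : List Nat))) (n + pvCntE w p, pvAlive w p)
        = (n + pvCntE w (p ++ r), pvAlive w (p ++ r)) := by
  induction r with
  | nil => intro p n; simp
  | cons ch r ih =>
    intro p n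
    rw [List.foldl_cons]
    have hstep : ((0 :: pvAlive w p).foldl (fun acc j =>
        if w.getD j ' ' == ch then
          if j + 1 == w.length then (acc.1 + 1, acc.2) else (acc.1, acc.2 ++ [j + 1])
        else acc) (n + pvCntE w p, ([] : List Nat)))
        = (n + pvCntE w (p ++ [ch]), pvAlive w (p ++ [ch])) := by
      rw [pvInner, pvCount_step w p ch hw, pvCntE_step, List.nil_append, pvAlive_step w p ch hw]
      simp only [Prod.mk.injEq]
      exact ⟨by omega, trivial⟩
    rw [hstep, ih (p ++ [ch]) n]
    simp
theorem pvCntE_nil (w : List Char) (hw : w ≠ []) : pvCntE w [] = 0 := by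
  unfold pvCntE
  rw [Finset.card_eq_zero, Finset.filter_eq_empty_iff]
  intro e _
  simp [List.suffix_nil, hw]

theorem pvAlive_nil (w : List Char) : pvAlive w [] = [] := by
  unfold pvAlive
  rw [List.map_eq_nil_iff, List.filter_eq_nil_iff]
  intro j hj
  rw [List.mem_range] at hj
  simp only [List.suffix_nil, List.take_eq_nil_iff, decide_eq_true_eq]
  rintro (h | h)
  · omega
  · subst h; simp at hj

theorem pvScanRow_eq (w row : List Char) (hw : w ≠ []) (n : Nat) :
    pvScanRow w n row = n + pvCntE w row := by
  unfold pvScanRow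
  have h0 : (n, ([] : List Nat)) = (n + pvCntE w [], pvAlive w []) := by
    rw [pvCntE_nil w hw, pvAlive_nil]
    simp
  rw [h0, pvScan_invariant w hw row [] n]
  simp
theorem pvCntE_eq_pvCnt (w row : List Char) (hw : w ≠ []) :
    pvCntE w row = pvCnt row w 0 := by
  have hwle : ∀ e, e ≤ row.length → w <:+ row.take e → w.length ≤ e := by
    intro e he hs
    have := hs.length_le
    simp [List.length_take] at this
    omega
  unfold pvCntE pvCnt
  refine Finset.card_bij' (fun e _ => e - w.length) (fun i _ => i + w.length) ?_ ?_ ?_ ?_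
  · intro e he
    simp only [Finset.mem_filter, Finset.mem_range] at he ⊢
    obtain ⟨he1, he2⟩ := he
    have hle := hwle e (by omega) he2
    refine ⟨by omega, by omega, ?_⟩
    obtain ⟨u, hu⟩ := he2
    have hulen : u.length = e - w.length := by
      have := congrArg List.length hu
      simp [List.length_take] at this
      omega
    have hsplit : row.drop (e - w.length) = (row.take e).drop (e - w.length) ++ row.drop e := by
      conv_lhs => rw [← List.take_append_drop e row]
      rw [List.drop_append_of_le_length (by simp; omega)]
    rw [hsplit, ← hu, ← hulen, List.drop_left]
    exact ⟨row.drop e, rfl⟩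
  · intro i hi
    simp only [Finset.mem_filter, Finset.mem_range] at hi ⊢
    obtain ⟨hi1, _, hp⟩ := hi
    obtain ⟨t', ht⟩ := hp
    have htlen : i + w.length ≤ row.length := by
      have := congrArg List.length ht
      simp [List.length_drop] at this
      omega
    refine ⟨by omega, ?_⟩
    have : row.take (i + w.length) = row.take i ++ w := by
      rw [List.take_add, ← ht, List.take_left]
    rw [this]
    exact ⟨row.take i, rfl⟩
  · intro e he
    simp only [Finset.mem_filter, Finset.mem_range] at he
    have := hwle e (by omega) he.2
    show e - w.length + w.length = e
    omega
  · intro i _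
    show i + w.length - w.length = i
    omega
theorem pvCnt_nil_word (row : List Char) : pvCnt row [] 0 = row.length + 1 := by
  unfold pvCnt
  rw [Finset.filter_true_of_mem, Finset.card_range]
  intro i _
  exact ⟨by omega, List.nil_prefix⟩
theorem pvFoldl_congr {α β : Type} (f g : β → α → β) (l : List α) (b : β)
    (h : ∀ b a, f b a = g b a) : l.foldl f b = l.foldl g b := by
  induction l generalizing b with
  | nil => rfl
  | cons x xs ih => simp only [List.foldl_cons, h]; exact ih _

-- B's per-word total is the sum of pvCnt over the rows
theorem pvWordTotalB (word : String) (rows : List String) :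
    (if word.toList.isEmpty then
        rows.foldl (fun t row => t + (row.toList.length + 1)) 0
      else rows.foldl (fun t row => pvScanRow word.toList t row.toList) 0)
      = rows.foldl (fun t row => t + pvCnt row.toList word.toList 0) 0 := by
  by_cases hw : word.toList.isEmpty
  · rw [if_pos hw]
    have hnil : word.toList = [] := by simpa [List.isEmpty_iff] using hw
    apply pvFoldl_congr
    intro b a
    rw [hnil, pvCnt_nil_word]
  · rw [if_neg hw]
    have hne : word.toList ≠ [] := by simpa [List.isEmpty_iff] using hw
    apply pvFoldl_congr
    intro b a
    rw [pvScanRow_eq _ _ hne, pvCntE_eq_pvCnt _ _ hne]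
theorem pvOuter (rows : List String) (wl : List String) (acc : List String) :
    wl.foldl (fun r_lst word =>
      rows.foldl (fun r_lst row =>
        let index := PySem.Str.find row word
        if index ≠ -1 then
          searchWhile row word ((PySem.Str.len row).toNat + 2) index.toNat (r_lst ++ [word])
        else r_lst) r_lst) acc =
    wl.foldl (fun out word =>
      out ++ List.replicate
        (if word.toList.isEmpty then
            rows.foldl (fun t row => t + (row.toList.length + 1)) 0
          else rows.foldl (fun t row => pvScanRow word.toList t row.toList) 0) word) acc := by
  induction wl generalizing acc with
  | nil => rfl
  | cons w ws ih =>
    simp only [List.foldl_cons]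
    rw [pvWordFoldA, pvWordTotalB, ih]

-- ===== VERDICT (by name: the statement is the Claim_ definition above) =====
theorem search_r_spec : Claim_equal_search_r := by
  intro wl mat _
  show search_r wl mat = search_r_alt wl mat
  unfold search_r search_r_alt
  simp only [PySem.List.slice_none_none, PySem.List.foldl_append_singleton_eq_map, List.nil_append]
  exact pvOuter _ wl []
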